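-- pv_equiv track=rewrite | github.com/BejaLab/BLASSO-Rhodopsin | workflow/scripts/transfer_positions.py | seq2aln
-- ===== SOURCE A (Python) =====
-- def seq2aln(seq, seq_positions):
--     aln_positions = {}
--     seq_pos = 0
--     for aln_i, res in enumerate(seq):
--         is_not_gap = res != '-'
--         seq_pos += is_not_gap
--         if seq_pos in seq_positions and is_not_gap:
--             aln_positions[aln_i + 1] = seq_pos
--     return aln_positions
-- ===== SOURCE B (Python) =====
-- def seq2aln(seq, seq_positions):
--     # Pass 1: index table, res_to_aln[k-1] = 0-based alignment index of k-th residue.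
--     res_to_aln = []
--     for aln_i, res in enumerate(seq):
--         if res != '-':
--             res_to_aln.append(aln_i)
--     # Pass 2: drive by the target positions (sorted so keys come out ascending).
--     aln_positions = {}
--     for p in sorted(set(seq_positions)):
--         if 1 <= p <= len(res_to_aln):
--             aln_positions[res_to_aln[p - 1] + 1] = p
--     return aln_positions
-- ===== Notes on version B (the rewrite author's own statement) =====
-- stated objective: alternative
-- what changed: A drives one fused loop over the characters of seq with a running residue counter, a membership test and dict inserts; B decomposes the task into a pass building a residue-to-alignment index table and a second loop over sorted(set(seq_positions)) that emits each valid target position via one table lookup.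
import Mathlib
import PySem

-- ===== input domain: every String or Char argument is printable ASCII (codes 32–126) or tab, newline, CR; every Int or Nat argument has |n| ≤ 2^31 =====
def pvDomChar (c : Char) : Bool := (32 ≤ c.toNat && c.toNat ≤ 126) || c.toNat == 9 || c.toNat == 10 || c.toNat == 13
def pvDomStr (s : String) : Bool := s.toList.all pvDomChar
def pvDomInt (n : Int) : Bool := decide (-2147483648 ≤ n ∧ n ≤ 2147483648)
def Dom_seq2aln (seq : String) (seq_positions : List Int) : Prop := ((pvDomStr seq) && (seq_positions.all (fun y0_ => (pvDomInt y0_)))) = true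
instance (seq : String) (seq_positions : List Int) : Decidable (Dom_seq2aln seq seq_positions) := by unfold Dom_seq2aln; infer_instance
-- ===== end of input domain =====

-- B replaces A's per-character membership scan of seq_positions by a prebuilt residue→alignment
-- index table and a loop over sorted(set(seq_positions)); return value proved equal to A's.

-- ===== PORT A =====
-- the body of A's for-loop (state: the dict aln_positions and the counter seq_pos)
def stepA (seq_positions : List Int) (st : PySem.Dict Int Int × Int) (pr : Int × Char) :
    PySem.Dict Int Int × Int :=
  let is_not_gap : Bool := pr.2 != '-'
  let seq_pos : Int := st.2 + (if is_not_gap then 1 else 0)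
  if seq_pos ∈ seq_positions ∧ is_not_gap = true then
    (st.1.insert (pr.1 + 1) seq_pos, seq_pos)
  else
    (st.1, seq_pos)

def seq2aln (seq : String) (seq_positions : List Int) : List (Int × Int) :=
  (((PySem.List.enumerate seq.toList 0).foldl (stepA seq_positions)
      (PySem.Dict.empty, 0)).1).items

-- ===== PORT B =====
-- the body of B's second for-loop
def stepB (res_to_aln : List Int) (d : PySem.Dict Int Int) (p : Int) : PySem.Dict Int Int :=
  if 1 ≤ p ∧ p ≤ (res_to_aln.length : Int) then
    d.insert (PySem.List.pyGetD res_to_aln (p - 1) 0 + 1) p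
  else d

def seq2aln_alt (seq : String) (seq_positions : List Int) : List (Int × Int) :=
  let res_to_aln : List Int :=
    (PySem.List.enumerate seq.toList 0).foldl
      (fun acc pr => if pr.2 != '-' then acc ++ [pr.1] else acc) []
  ((PySem.List.sorted (PySem.Set.ofList seq_positions) (fun x => x) false).foldl
      (stepB res_to_aln) PySem.Dict.empty).items

-- ===== PRECONDITION & SPEC =====
def Spec_seq2aln (seq : String) (seq_positions : List Int) (out : List (Int × Int)) : Prop := out = seq2aln_alt seq seq_positions
instance (seq : String) (seq_positions : List Int) (out : List (Int × Int)) : Decidable (Spec_seq2aln seq seq_positions out) := by unfold Spec_seq2aln; infer_instance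

-- ===== CLAIM (what is proved, stated in full; the proofs are below) =====
def Claim_equal_seq2aln : Prop := ∀ (seq : String) (seq_positions : List Int), Dom_seq2aln seq seq_positions → Spec_seq2aln seq seq_positions (seq2aln seq seq_positions)

-- ===== LEMMAS AND PROOFS =====

-- alignment indices of the non-gap residues of cs, starting at alignment index i
def Rf : List Char → Int → List Int
  | [], _ => []
  | r :: rest, i => if r ≠ '-' then i :: Rf rest (i + 1) else Rf rest (i + 1)

-- the common canonical value: pairs (aln_index+1, residue_number) for wanted residues
def Tlist (ps : List Int) (cs : List Char) (i c : Int) : List (Int × Int) :=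
  ((PySem.List.enumerate (Rf cs i) (c + 1)).filter (fun pr => decide (pr.1 ∈ ps))).map
    (fun pr => (pr.2 + 1, pr.1))

lemma resfold (cs : List Char) : ∀ (i : Int) (acc : List Int),
    (PySem.List.enumerate cs i).foldl
      (fun acc pr => if pr.2 != '-' then acc ++ [pr.1] else acc) acc = acc ++ Rf cs i := by
  induction cs with
  | nil => intro i acc; simp [PySem.List.enumerate_nil, Rf]
  | cons r rest ih =>
    intro i acc
    rw [PySem.List.enumerate_cons, List.foldl_cons, ih]
    by_cases h : r = '-' <;> simp [Rf, h]

lemma Rf_mem_le (cs : List Char) : ∀ (i : Int) (x : Int), x ∈ Rf cs i → i ≤ x := by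
  induction cs with
  | nil => intro i x hx; simp [Rf] at hx
  | cons r rest ih =>
    intro i x hx
    by_cases h : r = '-'
    · simp [Rf, h] at hx
      have := ih (i + 1) x hx; omega
    · simp [Rf, h] at hx
      rcases hx with hx | hx
      · omega
      · have := ih (i + 1) x hx; omega

lemma Rf_pairwise (cs : List Char) : ∀ (i : Int), (Rf cs i).Pairwise (· < ·) := by
  induction cs with
  | nil => intro i; simp [Rf]
  | cons r rest ih =>
    intro i
    by_cases h : r = '-'
    · simpa [Rf, h] using ih (i + 1)
    · simp only [Rf, h, ne_eq, not_false_eq_true, if_pos]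
      refine List.Pairwise.cons ?_ (ih (i + 1))
      intro x hx
      have := Rf_mem_le rest (i + 1) x hx; omega

lemma stepA_gap (ps : List Int) (d : PySem.Dict Int Int) (c i : Int) (r : Char)
    (h : r = '-') : stepA ps (d, c) (i, r) = (d, c) := by
  simp [stepA, h]

lemma stepA_res_mem (ps : List Int) (d : PySem.Dict Int Int) (c i : Int) (r : Char)
    (h : ¬ r = '-') (hm : (c + 1) ∈ ps) :
    stepA ps (d, c) (i, r) = (d.insert (i + 1) (c + 1), c + 1) := by
  simp [stepA, h, hm]

lemma stepA_res_not (ps : List Int) (d : PySem.Dict Int Int) (c i : Int) (r : Char)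
    (h : ¬ r = '-') (hm : (c + 1) ∉ ps) : stepA ps (d, c) (i, r) = (d, c + 1) := by
  simp [stepA, h, hm]

lemma not_contains_of_keys_le (d : PySem.Dict Int Int) (i : Int)
    (hd : ∀ kv ∈ d.items, kv.1 ≤ i) : d.contains (i + 1) = false := by
  by_contra hcc
  have hc : d.contains (i + 1) = true := by
    cases hx : d.contains (i + 1) <;> simp_all
  rw [PySem.Dict.contains_iff_mem_keys] at hc
  simp only [PySem.Dict.keys, List.mem_map] at hc
  obtain ⟨kv, hkv, hfst⟩ := hc
  have := hd kv hkv
  omega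

lemma A_loop (ps : List Int) (cs : List Char) : ∀ (i c : Int) (d : PySem.Dict Int Int),
    (∀ kv ∈ d.items, kv.1 ≤ i) →
    (((PySem.List.enumerate cs i).foldl (stepA ps) (d, c)).1).items
      = d.items ++ Tlist ps cs i c := by
  induction cs with
  | nil => intro i c d hd; simp [PySem.List.enumerate_nil, Tlist, Rf]
  | cons r rest ih =>
    intro i c d hd
    rw [PySem.List.enumerate_cons, List.foldl_cons]
    by_cases h : r = '-'
    · rw [stepA_gap ps d c i r h,
        ih (i + 1) c d (fun kv hkv => by have := hd kv hkv; omega)]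
      simp [Tlist, Rf, h]
    · by_cases hm : (c + 1) ∈ ps
      · rw [stepA_res_mem ps d c i r h hm]
        have hfresh := not_contains_of_keys_le d i hd
        have hitems : (d.insert (i + 1) (c + 1)).items = d.items ++ [(i + 1, c + 1)] := by
          simp [PySem.Dict.items_insert, hfresh]
        rw [ih (i + 1) (c + 1) _ (fun kv hkv => by
          rw [hitems] at hkv
          rcases List.mem_append.1 hkv with hkv | hkv
          · have := hd kv hkv; omega
          · rw [List.mem_singleton] at hkv; subst hkv; simp)]
        rw [hitems]
        simp [Tlist, Rf, h, hm, PySem.List.enumerate_cons]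
      · rw [stepA_res_not ps d c i r h hm,
          ih (i + 1) (c + 1) d (fun kv hkv => by have := hd kv hkv; omega)]
        simp [Tlist, Rf, h, hm, PySem.List.enumerate_cons]

lemma keylt_eq (l₁ l₂ : List (Int × Int)) (hp : l₁.Perm l₂)
    (h₁ : l₁.Pairwise (fun p q => p.1 < q.1)) (h₂ : l₂.Pairwise (fun p q => p.1 < q.1)) :
    l₁ = l₂ :=
  hp.eq_of_pairwise (fun _ _ _ _ hab hba => by omega) h₁ h₂

lemma A_eq_T (seq : String) (ps : List Int) :
    seq2aln seq ps = Tlist ps seq.toList 0 0 := by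
  unfold seq2aln
  rw [A_loop ps seq.toList 0 0 PySem.Dict.empty (by simp [PySem.Dict.empty])]
  simp [PySem.Dict.empty]

lemma key_mono (R : List Int) (hpw : R.Pairwise (· < ·)) (a b : Int)
    (ha1 : 1 ≤ a) (ha2 : a ≤ (R.length : Int)) (hb2 : b ≤ (R.length : Int))
    (hab : a < b) :
    PySem.List.pyGetD R (a - 1) 0 < PySem.List.pyGetD R (b - 1) 0 := by
  rw [PySem.List.pyGetD_eq_getElem R (i := a - 1) 0 (by omega) (by omega),
    PySem.List.pyGetD_eq_getElem R (i := b - 1) 0 (by omega) (by omega)]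
  exact List.pairwise_iff_getElem.1 hpw _ _ (by omega) (by omega) (by omega)

lemma B_items (ps : List Int) (R : List Int) (hpw : R.Pairwise (· < ·)) :
    ((PySem.List.sorted (PySem.Set.ofList ps) (fun x => x) false).foldl
        (stepB R) PySem.Dict.empty).items
      = ((PySem.List.enumerate R 1).filter (fun pr => decide (pr.1 ∈ ps))).map
          (fun pr => (pr.2 + 1, pr.1)) := by
  have hstep : ∀ (d : PySem.Dict Int Int) (p : Int), stepB R d p =
      if (fun p => decide (1 ≤ p ∧ p ≤ (R.length : Int))) p = true then
        d.insert (PySem.List.pyGetD R (p - 1) 0 + 1) p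
      else d := by
    intro d p; simp [stepB]
  simp only [funext fun d => funext fun p => hstep d p]
  rw [← List.foldl_filter]
  set S := PySem.List.sorted (PySem.Set.ofList ps) (fun x => x) false with hSdef
  set L := S.filter (fun p => decide (1 ≤ p ∧ p ≤ (R.length : Int))) with hLdef
  have hS : S.Pairwise (· < ·) := PySem.List.sorted_ofList_pairwise_lt ps
  have hL : L.Pairwise (· < ·) := hS.filter _
  have hLguard : ∀ p ∈ L, 1 ≤ p ∧ p ≤ (R.length : Int) := by
    intro p hp
    have := (List.mem_filter.1 hp).2
    simpa using this
  have hLkey : L.Pairwise (fun a b =>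
      PySem.List.pyGetD R (a - 1) 0 + 1 < PySem.List.pyGetD R (b - 1) 0 + 1) := by
    refine List.Pairwise.imp_of_mem ?_ hL
    intro a b ha hb hab
    have h1 := hLguard a ha
    have h2 := hLguard b hb
    have := key_mono R hpw a b h1.1 h1.2 h2.2 hab
    omega
  have hnd : (L.map (fun p => PySem.List.pyGetD R (p - 1) 0 + 1)).Nodup :=
    (List.pairwise_map).2 (hLkey.imp (fun hl => by omega))
  rw [PySem.Dict.items_foldl_insert_fresh L
        (fun p => PySem.List.pyGetD R (p - 1) 0 + 1) (fun p => p) PySem.Dict.empty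
        (fun a _ => by simp [PySem.Dict.empty, PySem.Dict.contains]) hnd]
  have hempty : (PySem.Dict.empty : PySem.Dict Int Int).items = [] := rfl
  rw [hempty, List.nil_append]
  -- both sides are key-strictly-increasing lists of pairs with the same members
  have hBpw : (L.map (fun a => (PySem.List.pyGetD R (a - 1) 0 + 1, a))).Pairwise
      (fun p q : Int × Int => p.1 < q.1) :=
    (List.pairwise_map).2 (hLkey.imp (fun hl => hl))
  have hsnd : (PySem.List.enumerate R 1).Pairwise (fun a b => a.2 < b.2) := by
    apply (List.pairwise_map).1
    rw [PySem.List.map_snd_enumerate]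
    exact hpw
  have hTpw : (((PySem.List.enumerate R 1).filter (fun pr => decide (pr.1 ∈ ps))).map
      (fun pr => (pr.2 + 1, pr.1))).Pairwise (fun p q : Int × Int => p.1 < q.1) :=
    (List.pairwise_map).2 ((hsnd.filter _).imp (fun hl => by omega))
  apply keylt_eq _ _ ?_ hBpw hTpw
  · -- the permutation, from nodup + equal membership
    apply (List.perm_ext_iff_of_nodup
      (hBpw.imp (fun {a b} hl => by intro he; rw [he] at hl; omega))
      (hTpw.imp (fun {a b} hl => by intro he; rw [he] at hl; omega))).2
    intro pr
    constructor
    · intro hpr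
      obtain ⟨p, hpL, hpe⟩ := List.mem_map.1 hpr
      obtain ⟨h1, h2⟩ := hLguard p hpL
      have hmemps : p ∈ ps := by
        have := (List.mem_filter.1 hpL).1
        rw [PySem.List.mem_sorted, PySem.Set.mem_ofList] at this
        exact this
      apply List.mem_map.2
      refine ⟨(p, PySem.List.pyGetD R (p - 1) 0), ?_, ?_⟩
      · apply List.mem_filter.2
        refine ⟨?_, by simpa using hmemps⟩
        rw [PySem.List.mem_enumerate_iff]
        refine ⟨(p - 1).toNat, by omega, ?_⟩
        rw [PySem.List.pyGetD_eq_getElem R (i := p - 1) 0 (by omega) (by omega)]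
        simp only [Prod.mk.injEq]
        exact ⟨by omega, trivial⟩
      · simpa using hpe
    · intro hpr
      obtain ⟨e, he, hpe⟩ := List.mem_map.1 hpr
      obtain ⟨hee, hmem⟩ := List.mem_filter.1 he
      obtain ⟨k, hk, hke⟩ := (PySem.List.mem_enumerate_iff R 1 e).1 hee
      subst hke
      apply List.mem_map.2
      refine ⟨1 + (k : Int), List.mem_filter.2 ⟨?_, by simp; omega⟩, ?_⟩
      · rw [PySem.List.mem_sorted, PySem.Set.mem_ofList]
        simpa using hmem
      · have hidx : PySem.List.pyGetD R (1 + (k : Int) - 1) 0 = R[k] := by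
          rw [PySem.List.pyGetD_eq_getElem R (i := 1 + (k : Int) - 1) 0 (by omega) (by omega)]
          congr 1
          omega
        simp only [hidx]
        simpa using hpe

lemma B_eq_T (seq : String) (ps : List Int) :
    seq2aln_alt seq ps = Tlist ps seq.toList 0 0 := by
  simp only [seq2aln_alt, resfold, List.nil_append]
  rw [B_items ps (Rf seq.toList 0) (Rf_pairwise _ 0)]
  norm_num [Tlist]

-- ===== VERDICT (by name: the statement is the Claim_ definition above) =====
theorem seq2aln_spec : Claim_equal_seq2aln := by
  intro seq ps _
  unfold Spec_seq2aln
  rw [A_eq_T, B_eq_T]
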